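/- GENERATED by farm/mkstatement.py from design/units.tsv (unit `make_block_array`) and the Specs of Vorbis/Spec/*.lean — do not edit.
   THE STATEMENT of the proof unit `make_block_array`: the function `make_block_array` (33 instructions) satisfies its contract,
   given the contracts of its callees. What the names mean: Vorbis/Spec/Basic.lean. The theorem to prove:
   `theorem make_block_array_ok : Vorbis.Spec.make_block_array.Statement`. -/
import Vorbis.Spec.Alloc
namespace Vorbis.Spec.make_block_array
open X86 X86.User Asan

/-- The statement of unit `make_block_array`. -/
def Statement : Prop :=
  ∀ (Lay : Layout) (_hLay : Lay.hi = 0x1000000) (μ : Microarch) (_hμ : UserX.MicroOK μ) (u₀ : State)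
    (_hcode : HasCodeNat Lay u₀ Vorbis.L.make_block_array.entry Vorbis.Code.code_make_block_array.nat Vorbis.L.make_block_array.size)
    (_h_asan_store8_noabort : Asan.SmallCheck Lay μ Vorbis.WayInv (Vorbis.CodeOK u₀) [.rax, .rcx, .rdx] 8 Vorbis.L.__asan_store8_noabort.entry),
    ∀ (others : List Obj) (frames : List (Nat × FrameLayout)), Calls Lay μ Vorbis.WayInv (Vorbis.conv u₀) Vorbis.L.make_block_array.entry (Vorbis.Spec.make_block_array.spec others frames)

end Vorbis.Spec.make_block_array
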